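-- pv_equiv track=rewrite | github.com/finnsrnmarx-cloud/CLI | puzzle/solvers/grid_utils.py | subsequence_in_line
-- ===== SOURCE A (Python) =====
-- def subsequence_in_line(word: str, line: str) -> list[list[int]]:
--     """All sets of column indices (0-based into `line`) where `word`
--     appears as a subsequence. Returns list of index-lists."""
--     w = word.lower()
--     line = line.lower()
--     results: list[list[int]] = []
--
--     def dfs(wi: int, start: int, picks: list[int]) -> None:
--         if wi == len(w):
--             results.append(picks.copy())
--             return
--         for j in range(start, len(line)):
--             if line[j] == w[wi]:
--                 picks.append(j)
--                 dfs(wi + 1, j + 1, picks)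
--                 picks.pop()
--
--     dfs(0, 0, [])
--     return results
-- ===== SOURCE B (Python) =====
-- def subsequence_in_line(word: str, line: str) -> list[list[int]]:
--     """All sets of column indices (0-based into `line`) where `word`
--     appears as a subsequence. Returns list of index-lists."""
--     w = word.lower()
--     l = line.lower()
--     partials: list[list[int]] = [[]]
--     for c in w:
--         partials = [p + [j]
--                     for p in partials
--                     for j in range(p[-1] + 1 if p else 0, len(l))
--                     if l[j] == c]
--     return partials
-- ===== Notes on version B (the rewrite author's own statement) =====
-- stated objective: simpler
-- what changed: Replaces A's recursive DFS with backtracking (nested closure mutating picks/results) by a single left-to-right fold: one layer of partial matches per word character, each layer built by a comprehension extending every partial with the next matching positions.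
import Mathlib
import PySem

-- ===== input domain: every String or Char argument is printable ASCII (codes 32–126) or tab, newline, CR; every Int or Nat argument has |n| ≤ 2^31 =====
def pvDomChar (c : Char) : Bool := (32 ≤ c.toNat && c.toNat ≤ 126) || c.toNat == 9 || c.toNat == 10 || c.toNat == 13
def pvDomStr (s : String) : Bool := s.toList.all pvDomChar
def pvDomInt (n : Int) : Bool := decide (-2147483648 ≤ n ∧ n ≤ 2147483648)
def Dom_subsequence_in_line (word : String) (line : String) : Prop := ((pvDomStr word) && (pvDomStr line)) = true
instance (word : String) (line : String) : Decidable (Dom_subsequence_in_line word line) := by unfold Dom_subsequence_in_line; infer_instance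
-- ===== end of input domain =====

-- B replaces A's recursive DFS with a layered fold over the word (one layer of partial matches per character); same return value, simpler iteration.

-- ===== PORT A =====
-- A's nested `dfs(wi, start, picks)`: recursion on the remaining word suffix; the inner
-- `for j in range(start, len(line))` loop collecting into `results` becomes a flatMap.
def dfsA (l : List Char) : List Char → Int → List Int → List (List Int)
  | [], _, picks => [picks]
  | c :: ws, start, picks =>
      (PySem.List.pyRange start l.length 1).flatMap fun j =>
        if PySem.List.pyGet? l j = some c then dfsA l ws (j + 1) (picks ++ [j]) else []

def subsequence_in_line (word : String) (line : String) : List (List Int) :=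
  dfsA (PySem.Str.lower line).toList (PySem.Str.lower word).toList 0 []

-- ===== PORT B =====
-- one layer step of Source B's comprehension: extend every partial p with each matching j
def stepB (l : List Char) (ps : List (List Int)) (c : Char) : List (List Int) :=
  ps.flatMap fun p =>
    (PySem.List.pyRange (match p.getLast? with | some j => j + 1 | none => 0) l.length 1).filterMap
      fun j => if PySem.List.pyGet? l j = some c then some (p ++ [j]) else none

def subsequence_in_line_alt (word : String) (line : String) : List (List Int) :=
  ((PySem.Str.lower word).toList).foldl (stepB (PySem.Str.lower line).toList) [[]]

-- ===== PRECONDITION & SPEC =====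
def Spec_subsequence_in_line (word : String) (line : String) (out : List (List Int)) : Prop := out = subsequence_in_line_alt word line
instance (word : String) (line : String) (out : List (List Int)) : Decidable (Spec_subsequence_in_line word line out) := by unfold Spec_subsequence_in_line; infer_instance

-- ===== CLAIM (what is proved, stated in full; the proofs are below) =====
def Claim_equal_subsequence_in_line : Prop := ∀ (word : String) (line : String), Dom_subsequence_in_line word line → Spec_subsequence_in_line word line (subsequence_in_line word line)

-- ===== LEMMAS AND PROOFS =====

def nextStart (p : List Int) : Int := match p.getLast? with | some j => j + 1 | none => 0

lemma flatMap_filterMap_option {α β γ : Type} (xs : List α) (g : α → Option β) (F : β → List γ) :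
    (xs.filterMap g).flatMap F
      = xs.flatMap (fun x => match g x with | some y => F y | none => []) := by
  induction xs with
  | nil => simp
  | cons x xs ih =>
    cases h : g x <;> simp [h, ih]

lemma foldl_stepB (l : List Char) (ws : List Char) :
    ∀ ps : List (List Int),
      ws.foldl (stepB l) ps = ps.flatMap (fun p => dfsA l ws (nextStart p) p) := by
  induction ws with
  | nil => intro ps; simp [dfsA]
  | cons c ws ih =>
    intro ps
    rw [List.foldl_cons, ih, stepB, List.flatMap_assoc]
    apply List.flatMap_congr
    intro p _
    rw [flatMap_filterMap_option]
    show _ = dfsA l (c :: ws) (nextStart p) p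
    rw [dfsA]
    apply List.flatMap_congr
    intro j _
    by_cases h : PySem.List.pyGet? l j = some c
    · simp only [h, if_true]
      have : nextStart (p ++ [j]) = j + 1 := by
        simp [nextStart]
      rw [this]
    · simp [h]

theorem subsequence_in_line_eq_alt (word line : String) :
    subsequence_in_line word line = subsequence_in_line_alt word line := by
  rw [subsequence_in_line, subsequence_in_line_alt, foldl_stepB]
  simp [nextStart]

-- ===== VERDICT (by name: the statement is the Claim_ definition above) =====
theorem subsequence_in_line_spec : Claim_equal_subsequence_in_line := by
  intro word line _
  exact subsequence_in_line_eq_alt word line
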